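-- pv_equiv track=rewrite | github.com/rajeevtgim01/Rajeev_GEN_AI_Project | app.py | _snap_topic
-- ===== SOURCE A (Python) =====
-- from typing import Any, Dict, List, Optional, Tuple
--
-- def _snap_topic(label: str, topics: List[str]) -> str:
--     lab = (label or "").strip()
--     if not topics:
--         return lab or "Other"
--     low = lab.lower()
--     for t in topics:
--         if t.lower() == low:
--             return t
--     for t in topics:
--         tl = t.lower()
--         if low in tl or tl in low:
--             return t
--     for t in topics:
--         if t.lower() == "other":
--             return t
--     return topics[0]
-- ===== SOURCE B (Python) =====
-- def _snap_topic(label, topics):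
--     lab = (label or "").strip()
--     if not topics:
--         return lab or "Other"
--     low = lab.lower()
--     exact = sub = other = None
--     for t in topics:
--         tl = t.lower()
--         if exact is None and tl == low:
--             exact = t
--         if sub is None and (low in tl or tl in low):
--             sub = t
--         if other is None and tl == "other":
--             other = t
--     for c in (exact, sub, other):
--         if c is not None:
--             return c
--     return topics[0]
-- ===== Notes on version B (the rewrite author's own statement) =====
-- stated objective: alternative
-- what changed: Replaces A's three sequential scans over topics (exact, substring, 'other') with one scan that records the first hit for each of three candidate slots and resolves them by priority after the loop.
import Mathlib
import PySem

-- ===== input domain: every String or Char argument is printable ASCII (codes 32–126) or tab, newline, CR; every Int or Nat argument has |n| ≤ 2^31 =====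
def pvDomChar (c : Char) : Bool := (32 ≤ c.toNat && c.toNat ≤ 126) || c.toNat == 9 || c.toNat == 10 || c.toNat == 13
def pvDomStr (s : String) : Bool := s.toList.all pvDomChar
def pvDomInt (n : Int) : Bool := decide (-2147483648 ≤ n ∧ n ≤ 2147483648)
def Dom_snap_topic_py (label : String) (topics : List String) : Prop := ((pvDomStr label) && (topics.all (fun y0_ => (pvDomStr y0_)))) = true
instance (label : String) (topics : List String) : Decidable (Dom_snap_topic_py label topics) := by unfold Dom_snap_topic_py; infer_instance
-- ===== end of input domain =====

-- B replaces A's three sequential scans by ONE scan maintaining three first-hit candidate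
-- slots (exact / substring / "other"), resolved by priority after the loop (objective: alternative).

-- ===== PORT A =====
-- each 'for t in topics: if p(t): return t' loop of A, as first-match structural recursion
def snapFindA (p : String → Bool) : List String → Option String
  | [] => none
  | t :: ts => if p t then some t else snapFindA p ts

def snap_topic_py (label : String) (topics : List String) : String :=
  let lab := PySem.Str.strip label
  match topics with
  | [] => if lab = "" then "Other" else lab
  | t0 :: _ =>
    let low := PySem.Str.lower lab
    match snapFindA (fun t => PySem.Str.lower t == low) topics with
    | some t => t
    | none =>
      match snapFindA (fun t =>
          PySem.Str.isIn low (PySem.Str.lower t) || PySem.Str.isIn (PySem.Str.lower t) low) topics with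
      | some t => t
      | none =>
        match snapFindA (fun t => PySem.Str.lower t == "other") topics with
        | some t => t
        | none => t0

-- ===== PORT B =====
-- one step of B's single loop: fill each still-empty candidate slot
def snapStep (low : String) (st : Option String × Option String × Option String)
    (t : String) : Option String × Option String × Option String :=
  let tl := PySem.Str.lower t
  (if st.1.isNone && tl == low then some t else st.1,
   if st.2.1.isNone && (PySem.Str.isIn low tl || PySem.Str.isIn tl low) then some t else st.2.1,
   if st.2.2.isNone && tl == "other" then some t else st.2.2)

def snap_topic_py_alt (label : String) (topics : List String) : String :=
  let lab := PySem.Str.strip label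
  match topics with
  | [] => if lab = "" then "Other" else lab
  | t0 :: _ =>
    let low := PySem.Str.lower lab
    let st := topics.foldl (snapStep low) (none, none, none)
    match st.1 with
    | some c => c
    | none =>
      match st.2.1 with
      | some c => c
      | none =>
        match st.2.2 with
        | some c => c
        | none => t0

-- ===== PRECONDITION & SPEC =====
def Spec_snap_topic_py (label : String) (topics : List String) (out : String) : Prop := out = snap_topic_py_alt label topics
instance (label : String) (topics : List String) (out : String) : Decidable (Spec_snap_topic_py label topics out) := by unfold Spec_snap_topic_py; infer_instance

-- ===== CLAIM (what is proved, stated in full; the proofs are below) =====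
def Claim_equal_snap_topic_py : Prop := ∀ (label : String) (topics : List String), Dom_snap_topic_py label topics → Spec_snap_topic_py label topics (snap_topic_py label topics)

-- ===== LEMMAS AND PROOFS =====

-- the single pass with three slots computes exactly the three first-match scans
theorem snapStep_foldl (low : String) (ts : List String)
    (e s o : Option String) :
    ts.foldl (snapStep low) (e, s, o) =
      ((e.orElse fun _ => snapFindA (fun t => PySem.Str.lower t == low) ts),
       (s.orElse fun _ => snapFindA (fun t =>
          PySem.Str.isIn low (PySem.Str.lower t) || PySem.Str.isIn (PySem.Str.lower t) low) ts),
       (o.orElse fun _ => snapFindA (fun t => PySem.Str.lower t == "other") ts)) := by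
  induction ts generalizing e s o with
  | nil => cases e <;> cases s <;> cases o <;> simp [snapFindA]
  | cons t ts ih =>
    simp only [List.foldl_cons, snapStep, snapFindA]
    rw [ih]
    cases e <;> cases s <;> cases o <;> simp <;> split_ifs <;> simp_all

-- ===== VERDICT (by name: the statement is the Claim_ definition above) =====
theorem snap_topic_py_spec : Claim_equal_snap_topic_py := by
  intro label topics _
  unfold Spec_snap_topic_py snap_topic_py snap_topic_py_alt
  cases topics with
  | nil => rfl
  | cons t0 rest =>
    simp only [snapStep_foldl, Option.orElse]
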